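-- pv_equiv track=rewrite | github.com/jeemyeong/problem-solving | boj-14698.py | solve
-- ===== SOURCE A (Python) =====
-- import heapq
--
-- def solve(N, slimes): # Using heap, 1636 MS	is used
--     if N == 1:
--         return 1
--     ret = 1
--     heap_slimes = []
--     for slime in slimes:
--         heapq.heappush(heap_slimes, (slime, slime))
--     for _ in range(N-1):
--         first_min = heapq.heappop(heap_slimes)
--         second_min = heapq.heappop(heap_slimes)
--         new_slime = first_min[1] * second_min[1]
--         heapq.heappush(heap_slimes, (new_slime, new_slime))
--         slimes.append(new_slime)
--         ret *= new_slime
--     return ret % 1000000007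
-- ===== SOURCE B (Python) =====
-- def solve(N, slimes):
--     if N == 1:
--         return 1
--     work = list(slimes)
--     ret = 1
--     for _ in range(N - 1):
--         m1 = min(work)
--         work.remove(m1)
--         m2 = min(work)
--         work.remove(m2)
--         new_slime = m1 * m2
--         work.append(new_slime)
--         slimes.append(new_slime)   # replicate A's mutation of the argument
--         ret *= new_slime
--     return ret % 1000000007
-- ===== Notes on version B (the rewrite author's own statement) =====
-- stated objective: simpler
-- what changed: Replaces the heapq priority queue of (x,x) pairs with a plain working list from which the two minima are found by min() and removed each round; same merge order because tie order never affects values.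
import Mathlib
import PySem

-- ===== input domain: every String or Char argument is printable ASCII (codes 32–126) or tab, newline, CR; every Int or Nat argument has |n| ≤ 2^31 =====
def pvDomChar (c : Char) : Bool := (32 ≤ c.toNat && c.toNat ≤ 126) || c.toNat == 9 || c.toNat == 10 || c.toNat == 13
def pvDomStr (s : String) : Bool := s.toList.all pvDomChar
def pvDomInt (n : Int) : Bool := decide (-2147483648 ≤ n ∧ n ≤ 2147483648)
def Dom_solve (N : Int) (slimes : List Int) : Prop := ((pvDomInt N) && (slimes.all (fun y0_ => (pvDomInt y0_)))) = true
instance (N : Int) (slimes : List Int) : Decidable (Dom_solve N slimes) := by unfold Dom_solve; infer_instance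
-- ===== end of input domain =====

-- B replaces A's heapq priority queue with a plain working list from which the two minima are
-- found and removed each round (simpler); equal return value everywhere A returns, and B also
-- replicates A's in-place appends to `slimes` (equivalence proved about the return value).


-- ===== PORT A =====
-- heapq.heappush / heappop are modeled by a list kept sorted by the pair's first component
-- (min at the head).  This is exact for this program: every stored pair is (x, x), so the
-- order chosen among pairs with equal keys never affects any value the program computes.
def heappush (h : List (Int × Int)) (p : Int × Int) : List (Int × Int) :=
  match h with
  | [] => [p]
  | q :: t => if p.1 < q.1 then p :: q :: t else q :: heappush t p

-- the `for _ in range(N-1)` loop; `none` = heappop on an exhausted heap (IndexError)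
def solveLoopA (k : Nat) (heap : List (Int × Int)) (ret : Int) : Option Int :=
  match k, heap with
  | 0, _ => some (PySem.Int.mod ret 1000000007)
  | k'+1, p :: q :: rest =>
      let n := p.2 * q.2
      solveLoopA k' (heappush rest (n, n)) (ret * n)
  | _+1, _ => none

def solve (N : Int) (slimes : List Int) : Int :=
  if N = 1 then 1
  else
    let heap := slimes.foldl (fun h s => heappush h (s, s)) []
    (solveLoopA (N - 1).toNat heap 1).getD 0

-- ===== PORT B =====
-- the `for _ in range(N-1)` loop over the working list; `none` = min() on an empty list (ValueError)
def solveLoopB (k : Nat) (ws : List Int) (ret : Int) : Option Int :=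
  match k with
  | 0 => some (PySem.Int.mod ret 1000000007)
  | k'+1 =>
    match PySem.List.min? ws (fun x => x) with
    | none => none
    | some m1 =>
      match PySem.List.remove? ws m1 with
      | none => none
      | some ws1 =>
        match PySem.List.min? ws1 (fun x => x) with
        | none => none
        | some m2 =>
          match PySem.List.remove? ws1 m2 with
          | none => none
          | some ws2 => solveLoopB k' (ws2 ++ [m1 * m2]) (ret * (m1 * m2))

def solve_alt (N : Int) (slimes : List Int) : Int :=
  if N = 1 then 1
  else (solveLoopB (N - 1).toNat slimes 1).getD 0

-- ===== PRECONDITION & SPEC =====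
-- Pre_ excludes exactly the inputs where A raises (heappop of an exhausted heap, i.e. 2 ≤ N and
-- slimes shorter than N); B raises there too (min of an empty list).
def Pre_solve (N : Int) (slimes : List Int) : Prop := N ≤ 1 ∨ N ≤ slimes.length
instance (N : Int) (slimes : List Int) : Decidable (Pre_solve N slimes) := by unfold Pre_solve; infer_instance
def pvWitness_solve : Int × List Int := (3, [2, 3, 5])

def Spec_solve (N : Int) (slimes : List Int) (out : Int) : Prop := out = solve_alt N slimes
instance (N : Int) (slimes : List Int) (out : Int) : Decidable (Spec_solve N slimes out) := by unfold Spec_solve; infer_instance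

-- ===== CLAIM (what is proved, stated in full; the proofs are below) =====
def Claim_equal_solve : Prop := ∀ (N : Int) (slimes : List Int), Dom_solve N slimes → Pre_solve N slimes → Spec_solve N slimes (solve N slimes)

-- ===== LEMMAS AND PROOFS =====

-- keys of the heap
def hkeys (h : List (Int × Int)) : List Int := h.map Prod.fst

-- invariant tying A's heap to B's working list
def HInv (h : List (Int × Int)) (ws : List Int) : Prop :=
  (hkeys h).Perm ws ∧ (hkeys h).Pairwise (· ≤ ·) ∧ ∀ p ∈ h, p.2 = p.1

lemma heappush_keys_perm (h : List (Int × Int)) (p : Int × Int) :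
    (hkeys (heappush h p)).Perm (p.1 :: hkeys h) := by
  induction h with
  | nil => simp [heappush, hkeys]
  | cons q t ih =>
    by_cases hc : p.1 < q.1
    · simp [heappush, hc, hkeys]
    · simp only [heappush, hc, if_false, hkeys, List.map_cons]
      exact (List.Perm.cons q.1 ih).trans (List.Perm.swap _ _ _)

lemma heappush_sorted (h : List (Int × Int)) (p : Int × Int)
    (hs : (hkeys h).Pairwise (· ≤ ·)) : (hkeys (heappush h p)).Pairwise (· ≤ ·) := by
  induction h with
  | nil => simp [heappush, hkeys]
  | cons q t ih =>
    simp only [hkeys, List.map_cons, List.pairwise_cons] at hs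
    by_cases hc : p.1 < q.1
    · simp only [heappush, hc, if_true, hkeys, List.map_cons, List.pairwise_cons]
      refine ⟨?_, hs.1, hs.2⟩
      intro b hb
      rcases List.mem_cons.mp hb with hb | hb
      · omega
      · have := hs.1 b hb; omega
    · simp only [heappush, hc, if_false, hkeys, List.map_cons, List.pairwise_cons]
      refine ⟨?_, ih hs.2⟩
      intro b hb
      have hb' : b ∈ p.1 :: hkeys t := (heappush_keys_perm t p).mem_iff.mp hb
      rcases List.mem_cons.mp hb' with hb' | hb'
      · omega
      · exact hs.1 b hb'

lemma heappush_diag : ∀ (h : List (Int × Int)) (p : Int × Int),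
    (∀ x ∈ h, x.2 = x.1) → p.2 = p.1 → ∀ x ∈ heappush h p, x.2 = x.1 := by
  intro h
  induction h with
  | nil => intro p hd hp x hx; simp [heappush] at hx; subst hx; exact hp
  | cons q t ih =>
    intro p hd hp x hx
    by_cases hc : p.1 < q.1
    · simp only [heappush, hc, if_true] at hx
      rcases List.mem_cons.mp hx with hx | hx
      · subst hx; exact hp
      · exact hd x hx
    · simp only [heappush, hc, if_false] at hx
      rcases List.mem_cons.mp hx with hx | hx
      · subst hx; exact hd x (by simp)
      · exact ih p (fun y hy => hd y (by simp [hy])) hp x hx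

-- min? over a list permuted from a sorted nonempty list returns exactly the head
lemma min?_of_perm_sorted (a : Int) (t : List Int) (ws : List Int)
    (hperm : (a :: t).Perm ws) (hs : (a :: t).Pairwise (· ≤ ·)) :
    PySem.List.min? ws (fun x => x) = some a := by
  have hne : ws ≠ [] := by
    intro h; subst h; exact (List.cons_ne_nil a t) (List.perm_nil.mp hperm)
  cases hmin : PySem.List.min? ws (fun x => x) with
  | none => exact absurd ((PySem.List.min?_eq_none_iff ws _).mp hmin) hne
  | some m =>
    have hmem : m ∈ ws := PySem.List.min?_mem hmin
    have hlow : ∀ y ∈ ws, m ≤ y := fun y hy => PySem.List.min?_isMin hmin y hy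
    have hma : m ∈ a :: t := hperm.mem_iff.mpr hmem
    have halow : ∀ y ∈ a :: t, a ≤ y := by
      intro y hy
      rcases List.mem_cons.mp hy with hy | hy
      · exact le_of_eq hy.symm
      · exact (List.pairwise_cons.mp hs).1 y hy
    have h1 : a ≤ m := halow m hma
    have h2 : m ≤ a := hlow a (hperm.mem_iff.mp (by simp))
    rw [le_antisymm h2 h1]

-- one erase step: the tail stays a permutation
lemma perm_erase_head (a : Int) (t ws : List Int) (hperm : (a :: t).Perm ws) :
    t.Perm (ws.erase a) := by
  have := hperm.erase a
  simpa [List.erase_cons_head] using this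

-- the core loop equivalence
lemma loop_eq (k : Nat) : ∀ (h : List (Int × Int)) (ws : List Int) (ret : Int),
    HInv h ws → solveLoopA k h ret = solveLoopB k ws ret := by
  induction k with
  | zero => intro h ws ret _; simp [solveLoopA, solveLoopB]
  | succ k' ih =>
    intro h ws ret hinv
    obtain ⟨hperm, hsort, hdiag⟩ := hinv
    match h with
    | [] =>
      have : ws = [] := (List.perm_nil.mp hperm.symm)
      subst this
      simp [solveLoopA, solveLoopB, PySem.List.min?]
    | [p] =>
      have hws : ws = [p.1] := List.perm_singleton.mp (by simpa [hkeys] using hperm.symm)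
      subst hws
      simp [solveLoopA, solveLoopB, PySem.List.remove?_cons_self, PySem.List.min?]
    | p :: q :: rest =>
      have hperm' : (p.1 :: q.1 :: hkeys rest).Perm ws := by simpa [hkeys] using hperm
      have hsort' : (p.1 :: q.1 :: hkeys rest).Pairwise (· ≤ ·) := by simpa [hkeys] using hsort
      -- first min
      have hm1 : PySem.List.min? ws (fun x => x) = some p.1 :=
        min?_of_perm_sorted p.1 (q.1 :: hkeys rest) ws hperm' hsort'
      have hmem1 : p.1 ∈ ws := hperm'.mem_iff.mp (by simp)
      have hrem1 : PySem.List.remove? ws p.1 = some (ws.erase p.1) :=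
        PySem.List.remove?_eq_some_erase ws _ hmem1
      have hperm1 : (q.1 :: hkeys rest).Perm (ws.erase p.1) := perm_erase_head _ _ _ hperm'
      -- second min
      have hsort1 : (q.1 :: hkeys rest).Pairwise (· ≤ ·) := (List.pairwise_cons.mp hsort').2
      have hm2 : PySem.List.min? (ws.erase p.1) (fun x => x) = some q.1 :=
        min?_of_perm_sorted q.1 (hkeys rest) (ws.erase p.1) hperm1 hsort1
      have hmem2 : q.1 ∈ ws.erase p.1 := hperm1.mem_iff.mp (by simp)
      have hrem2 : PySem.List.remove? (ws.erase p.1) q.1 = some ((ws.erase p.1).erase q.1) :=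
        PySem.List.remove?_eq_some_erase (ws.erase p.1) _ hmem2
      have hperm2 : (hkeys rest).Perm ((ws.erase p.1).erase q.1) := perm_erase_head _ _ _ hperm1
      -- values coincide
      have hp2 : p.2 = p.1 := hdiag p (by simp)
      have hq2 : q.2 = q.1 := hdiag q (by simp)
      -- new invariant
      have hnewperm : (hkeys (heappush rest (p.2 * q.2, p.2 * q.2))).Perm
          (((ws.erase p.1).erase q.1) ++ [p.1 * q.1]) := by
        refine (heappush_keys_perm rest _).trans ?_
        have : ((p.2 * q.2) :: hkeys rest).Perm (hkeys rest ++ [p.1 * q.1]) := by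
          rw [hp2, hq2]
          exact (List.perm_append_singleton _ _).symm
        exact this.trans (hperm2.append_right _)
      have hnewinv : HInv (heappush rest (p.2 * q.2, p.2 * q.2))
          (((ws.erase p.1).erase q.1) ++ [p.1 * q.1]) := by
        refine ⟨hnewperm, heappush_sorted _ _ (List.pairwise_cons.mp hsort1).2, ?_⟩
        exact heappush_diag _ _ (fun y hy => hdiag y (by simp [hy])) rfl
      have := ih _ _ (ret * (p.2 * q.2)) hnewinv
      simp only [solveLoopA, solveLoopB, hm1, hrem1, hm2, hrem2]
      rw [this, hp2, hq2]

-- the initial heap build establishes the invariant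
lemma build_inv (l : List Int) : ∀ (h : List (Int × Int)) (acc : List Int),
    HInv h acc → HInv (l.foldl (fun h s => heappush h (s, s)) h) (acc ++ l) := by
  induction l with
  | nil => intro h acc hi; simpa using hi
  | cons s t ih =>
    intro h acc hi
    obtain ⟨hperm, hsort, hdiag⟩ := hi
    have hi' : HInv (heappush h (s, s)) (acc ++ [s]) := by
      refine ⟨?_, heappush_sorted _ _ hsort, heappush_diag _ _ hdiag rfl⟩
      exact (heappush_keys_perm h (s, s)).trans
        ((hperm.cons s).trans (List.perm_append_singleton _ _).symm).symm.symm
    have := ih (heappush h (s, s)) (acc ++ [s]) hi'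
    simpa [List.append_assoc] using this

lemma solve_eq_alt (N : Int) (slimes : List Int) : solve N slimes = solve_alt N slimes := by
  unfold solve solve_alt
  by_cases hN : N = 1
  · simp [hN]
  · simp only [hN, if_false]
    have hinv : HInv (slimes.foldl (fun h s => heappush h (s, s)) []) slimes := by
      have := build_inv slimes [] [] ⟨by simp [hkeys], by simp [hkeys], by simp⟩
      simpa using this
    rw [loop_eq _ _ _ _ hinv]

-- ===== VERDICT (by name: the statement is the Claim_ definition above) =====
theorem solve_spec : Claim_equal_solve := by
  intro N slimes _ _
  unfold Spec_solve
  exact solve_eq_alt N slimes
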